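-- pv_equiv track=rewrite | github.com/KimGroup/trimer-tbg | mc/pocket.py | shape_of
-- ===== SOURCE A (Python) =====
-- def shape_of(mask):
--     if mask is None:
--         return None
--
--     if all(x == 0 for x in mask):
--         # periodic
--         return len(mask), [(0, len(mask))]
--
--     shift = mask.index(1)
--     mask = mask[shift:] + mask[:shift]
--
--     ret = []
--     begin = -1
--     for i in range(len(mask)):
--         if mask[i] == 1:
--             if begin < i - 1:
--                 ret.append(((begin+shift+1)%len(mask), i-begin-1))
--             begin = i
--     if begin < len(mask) - 1:
--         ret.append(((begin+shift+1)%len(mask), len(mask)-begin-1))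
--
--     return len(mask), ret
-- ===== SOURCE B (Python) =====
-- def shape_of(mask):
--     if mask is None:
--         return None
--     n = len(mask)
--     if all(x == 0 for x in mask):
--         # fully empty ring: one periodic gap covering everything
--         return n, [(0, n)]
--     ones = [i for i, x in enumerate(mask) if x == 1]
--     ret = []
--     for p, q in zip(ones, ones[1:] + [ones[0] + n]):
--         if q - p - 1 >= 1:
--             ret.append(((p + 1) % n, q - p - 1))
--     return n, ret
-- ===== Notes on version B (the rewrite author's own statement) =====
-- stated objective: simpler
-- what changed: Instead of rotating the mask to start at the first 1 and scanning it with a begin/shift state machine plus a trailing special case, B collects the one-positions once and emits each circular gap directly from consecutive pairs of ones (with a single wrap pair), with no rotation, no mutable begin sentinel and no post-loop append.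
import Mathlib
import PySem

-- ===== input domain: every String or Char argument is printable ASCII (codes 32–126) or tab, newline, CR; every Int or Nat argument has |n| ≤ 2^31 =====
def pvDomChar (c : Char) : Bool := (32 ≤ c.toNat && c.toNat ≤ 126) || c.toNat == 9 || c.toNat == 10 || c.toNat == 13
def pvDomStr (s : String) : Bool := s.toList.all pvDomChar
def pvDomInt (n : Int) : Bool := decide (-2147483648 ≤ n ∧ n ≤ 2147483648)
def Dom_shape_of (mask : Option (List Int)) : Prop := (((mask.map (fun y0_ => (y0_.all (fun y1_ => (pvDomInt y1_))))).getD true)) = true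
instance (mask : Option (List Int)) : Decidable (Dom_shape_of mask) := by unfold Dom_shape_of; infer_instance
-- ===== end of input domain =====

-- B replaces A's rotate-then-scan state machine by one pass over consecutive pairs of one-positions; objective: simpler.

-- ===== PORT A =====
def shape_of (mask : Option (List Int)) : Option (Int × (List (Int × Int))) :=
  match mask with
  | none => none
  | some m =>
    if m.all (fun x => x == 0) then some ((m.length : Int), [(0, (m.length : Int))])
    else
      match PySem.List.index? m 1 with
      | none => none  -- Python raises ValueError here (excluded by Pre_shape_of)
      | some shift =>
        -- mask = mask[shift:] + mask[:shift]
        let m2 := PySem.List.slice m (some (shift : Int)) none ++ PySem.List.slice m none (some (shift : Int))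
        let n : Int := m2.length
        let st := (PySem.List.enumerate m2 0).foldl
          (fun (st : List (Int × Int) × Int) ix =>
            if ix.2 == 1 then
              ((if st.2 < ix.1 - 1 then
                  st.1 ++ [(PySem.Int.mod (st.2 + (shift : Int) + 1) n, ix.1 - st.2 - 1)]
                else st.1), ix.1)
            else st)
          ([], -1)
        let ret := if st.2 < n - 1 then
            st.1 ++ [(PySem.Int.mod (st.2 + (shift : Int) + 1) n, n - st.2 - 1)]
          else st.1
        some (n, ret)

-- ===== PORT B =====
-- ones = [i for i, x in enumerate(m) if x == 1]
def onesOf (m : List Int) : List Int :=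
  (PySem.List.enumerate m 0).filterMap (fun ix => if ix.2 == 1 then some ix.1 else none)

def shape_of_alt (mask : Option (List Int)) : Option (Int × (List (Int × Int))) :=
  match mask with
  | none => none
  | some m =>
    let n : Int := m.length
    if m.all (fun x => x == 0) then some (n, [(0, n)])
    else
    match onesOf m with
    | [] => none  -- Python B raises IndexError at ones[0] here (excluded by Pre_shape_of)
    | o0 :: rest =>
      let ret := (List.zip (o0 :: rest) (rest ++ [o0 + n])).foldl
        (fun acc pq =>
          if 1 ≤ pq.2 - pq.1 - 1 then
            acc ++ [(PySem.Int.mod (pq.1 + 1) n, pq.2 - pq.1 - 1)]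
          else acc) []
      some (n, ret)

-- ===== PRECONDITION & SPEC =====
-- Pre_ excludes exactly the masks with a nonzero element but no 1, on which A raises ValueError at mask.index(1).
def Pre_shape_of (mask : Option (List Int)) : Prop :=
  (mask.getD []).all (fun x => x == 0) = true ∨ (1 : Int) ∈ mask.getD []
instance (mask : Option (List Int)) : Decidable (Pre_shape_of mask) := by unfold Pre_shape_of; infer_instance
def pvWitness_shape_of : Option (List Int) := some [0, 1, 0, 0, 1]

def Spec_shape_of (mask : Option (List Int)) (out : Option (Int × (List (Int × Int)))) : Prop := out = shape_of_alt mask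
instance (mask : Option (List Int)) (out : Option (Int × (List (Int × Int)))) : Decidable (Spec_shape_of mask out) := by unfold Spec_shape_of; infer_instance

-- ===== CLAIM (what is proved, stated in full; the proofs are below) =====
def Claim_equal_shape_of : Prop := ∀ (mask : Option (List Int)), Dom_shape_of mask → Pre_shape_of mask → Spec_shape_of mask (shape_of mask)

-- ===== LEMMAS AND PROOFS =====
-- A's scan of the rotated mask, as a recursion over enumerated pairs.
def segsA (n s : Int) : List (Int × Int) → Int → List (Int × Int)
  | [], b => if b < n - 1 then [(PySem.Int.mod (b + s + 1) n, n - b - 1)] else []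
  | (i, x) :: t, b =>
    if x == 1 then
      (if b < i - 1 then [(PySem.Int.mod (b + s + 1) n, i - b - 1)] else []) ++ segsA n s t i
    else segsA n s t b

-- A's scan, now walking only the one-positions of the rotated mask.
def walkA (n s : Int) : Int → List Int → List (Int × Int)
  | b, [] => if b < n - 1 then [(PySem.Int.mod (b + s + 1) n, n - b - 1)] else []
  | b, p :: ps => (if b < p - 1 then [(PySem.Int.mod (b + s + 1) n, p - b - 1)] else []) ++ walkA n s p ps

-- B's walk over consecutive one-pairs, with final sentinel l.
def walkB (n l : Int) : Int → List Int → List (Int × Int)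
  | p, [] => if 1 ≤ l - p - 1 then [(PySem.Int.mod (p + 1) n, l - p - 1)] else []
  | p, q :: qs => (if 1 ≤ q - p - 1 then [(PySem.Int.mod (p + 1) n, q - p - 1)] else []) ++ walkB n l q qs

-- positions (offset by k) of the 1s of a list
def onesFrom (k : Int) : List Int → List Int
  | [] => []
  | x :: t => if x == 1 then k :: onesFrom (k + 1) t else onesFrom (k + 1) t

theorem filterMap_enumerate_eq_onesFrom (l : List Int) :
    ∀ k : Int, (PySem.List.enumerate l k).filterMap
      (fun ix => if ix.2 = 1 then some ix.1 else none) = onesFrom k l := by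
  induction l with
  | nil => intro k; rfl
  | cons x t ih =>
    intro k
    simp only [PySem.List.enumerate_cons, List.filterMap_cons]
    by_cases h : x = 1 <;> simp [h, onesFrom, ih (k + 1)]

theorem onesOf_eq_onesFrom (m : List Int) : onesOf m = onesFrom 0 m := by
  unfold onesOf
  simp only [beq_iff_eq]
  exact filterMap_enumerate_eq_onesFrom m 0

theorem onesFrom_shift (l : List Int) : ∀ k : Int, onesFrom k l = (onesFrom 0 l).map (· + k) := by
  induction l with
  | nil => intro k; simp [onesFrom]
  | cons x t ih =>
    intro k
    simp only [onesFrom]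
    rw [ih (k + 1), ih (0 + 1)]
    by_cases h : x = 1
    · rw [if_pos (by simp [h]), if_pos (by simp [h]), List.map_cons, List.map_map]
      congr 1
      · omega
      · exact List.map_congr_left (fun a _ => by simp only [Function.comp_apply]; ring)
    · rw [if_neg (by simp [h]), if_neg (by simp [h]), List.map_map]
      exact List.map_congr_left (fun a _ => by simp only [Function.comp_apply]; ring)

theorem onesFrom_append (l1 l2 : List Int) : ∀ k : Int,
    onesFrom k (l1 ++ l2) = onesFrom k l1 ++ onesFrom (k + l1.length) l2 := by
  induction l1 with
  | nil => intro k; simp [onesFrom]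
  | cons x t ih =>
    intro k
    simp only [List.cons_append, onesFrom, ih (k + 1)]
    by_cases h : x = 1 <;>
      simp [h] <;>
      · congr 1; ring

theorem onesFrom_of_no_one (l : List Int) (h : ∀ x ∈ l, x ≠ 1) : ∀ k, onesFrom k l = [] := by
  induction l with
  | nil => intro k; rfl
  | cons x t ih =>
    intro k
    have hx : x ≠ 1 := h x (by simp)
    simp only [onesFrom]
    rw [if_neg (by simp [hx])]
    exact ih (fun y hy => h y (by simp [hy])) (k + 1)

-- A's fold (with the trailing append) computes segsA.
theorem foldA_eq_segsA (n s : Int) (l : List (Int × Int)) :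
    ∀ (acc : List (Int × Int)) (b : Int),
      (if (l.foldl
            (fun (st : List (Int × Int) × Int) ix =>
              if ix.2 == 1 then
                ((if st.2 < ix.1 - 1 then
                    st.1 ++ [(PySem.Int.mod (st.2 + s + 1) n, ix.1 - st.2 - 1)]
                  else st.1), ix.1)
              else st)
            (acc, b)).2 < n - 1 then
        (l.foldl
            (fun (st : List (Int × Int) × Int) ix =>
              if ix.2 == 1 then
                ((if st.2 < ix.1 - 1 then
                    st.1 ++ [(PySem.Int.mod (st.2 + s + 1) n, ix.1 - st.2 - 1)]
                  else st.1), ix.1)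
              else st)
            (acc, b)).1 ++
          [(PySem.Int.mod
              ((l.foldl
                  (fun (st : List (Int × Int) × Int) ix =>
                    if ix.2 == 1 then
                      ((if st.2 < ix.1 - 1 then
                          st.1 ++ [(PySem.Int.mod (st.2 + s + 1) n, ix.1 - st.2 - 1)]
                        else st.1), ix.1)
                    else st)
                  (acc, b)).2 + s + 1) n,
            n - (l.foldl
                  (fun (st : List (Int × Int) × Int) ix =>
                    if ix.2 == 1 then
                      ((if st.2 < ix.1 - 1 then
                          st.1 ++ [(PySem.Int.mod (st.2 + s + 1) n, ix.1 - st.2 - 1)]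
                        else st.1), ix.1)
                    else st)
                  (acc, b)).2 - 1)]
      else
        (l.foldl
            (fun (st : List (Int × Int) × Int) ix =>
              if ix.2 == 1 then
                ((if st.2 < ix.1 - 1 then
                    st.1 ++ [(PySem.Int.mod (st.2 + s + 1) n, ix.1 - st.2 - 1)]
                  else st.1), ix.1)
              else st)
            (acc, b)).1)
      = acc ++ segsA n s l b := by
  induction l with
  | nil =>
    intro acc b
    simp only [List.foldl_nil, segsA]
    split <;> simp
  | cons hd t ih =>
    intro acc b
    obtain ⟨i, x⟩ := hd
    by_cases hx : x = 1
    · subst hx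
      simp only [List.foldl_cons, segsA, BEq.rfl, if_pos]
      by_cases hb : b < i - 1
      · rw [if_pos hb, if_pos hb, ih (acc ++ [(PySem.Int.mod (b + s + 1) n, i - b - 1)]) i]
        simp
      · rw [if_neg hb, if_neg hb, ih acc i]
        simp
    · have hbx : (x == 1) = false := by simp [hx]
      simp only [List.foldl_cons, segsA, hbx, Bool.false_eq_true, if_false]
      exact ih acc b

theorem segsA_eq_walkA (n s : Int) (l : List (Int × Int)) :
    ∀ b : Int, segsA n s l b
      = walkA n s b (l.filterMap (fun ix => if ix.2 == 1 then some ix.1 else none)) := by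
  induction l with
  | nil => intro b; rfl
  | cons hd t ih =>
    intro b
    obtain ⟨i, x⟩ := hd
    by_cases hx : x = 1
    · subst hx
      simp only [segsA, BEq.rfl, if_pos, List.filterMap_cons]
      simp [walkA, ih i]
    · have hb : (x == 1) = false := by simp [hx]
      simp only [segsA, hb, List.filterMap_cons, Bool.false_eq_true, if_false]
      exact ih b

-- B's zip fold computes walkB.
theorem foldB_eq_walkB (n l : Int) (ps : List Int) :
    ∀ (p : Int) (acc : List (Int × Int)),
      (List.zip (p :: ps) (ps ++ [l])).foldl
        (fun acc pq =>
          if 1 ≤ pq.2 - pq.1 - 1 then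
            acc ++ [(PySem.Int.mod (pq.1 + 1) n, pq.2 - pq.1 - 1)]
          else acc) acc
      = acc ++ walkB n l p ps := by
  induction ps with
  | nil =>
    intro p acc
    simp only [List.nil_append, List.zip_cons_cons, List.zip_nil_left, List.foldl_cons,
      List.foldl_nil, walkB]
    split <;> simp
  | cons q qs ih =>
    intro p acc
    simp only [List.cons_append, List.zip_cons_cons, List.foldl_cons, walkB]
    rw [ih q]
    split <;> simp

-- the rotated walk equals B's walk.
theorem walkA_eq_walkB (n s : Int) (ps : List Int) :
    ∀ p : Int, walkA n s (p - s) (ps.map (· - s)) = walkB n (s + n) p ps := by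
  induction ps with
  | nil =>
    intro p
    simp only [List.map_nil, walkA, walkB]
    by_cases h : p - s < n - 1
    · rw [if_pos h, if_pos (by omega)]
      rw [show p - s + s + 1 = p + 1 by ring, show n - (p - s) - 1 = s + n - p - 1 by ring]
    · rw [if_neg h, if_neg (by omega)]
  | cons q qs ih =>
    intro p
    simp only [List.map_cons, walkA, walkB]
    rw [ih q]
    by_cases h : p - s < q - s - 1
    · rw [if_pos h, if_pos (by omega)]
      rw [show p - s + s + 1 = p + 1 by ring, show q - s - (p - s) - 1 = q - p - 1 by ring]
    · rw [if_neg h, if_neg (by omega)]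

-- ===== VERDICT (by name: the statement is the Claim_ definition above) =====
theorem shape_of_spec : Claim_equal_shape_of := by
  intro mask _hdom hpre
  unfold Spec_shape_of
  cases mask with
  | none => rfl
  | some m =>
    by_cases hall : ∀ x ∈ m, x = 0
    · -- all zero: A's guard fires; B sees no ones
      have hA : m.all (fun x => x == 0) = true := by
        simp only [List.all_eq_true]
        intro x hx; simp [hall x hx]
      simp only [shape_of, shape_of_alt, hA, if_pos]
    · -- a 1 is present
      have h1 : (1 : Int) ∈ m := by
        unfold Pre_shape_of at hpre
        simp only [Option.getD_some, List.all_eq_true] at hpre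
        rcases hpre with h | h
        · exact absurd (fun x hx => by simpa using h x hx) hall
        · exact h
      have hAguard : m.all (fun x => x == 0) = false := by
        simp only [List.all_eq_false]
        exact ⟨1, h1, by simp⟩
      obtain ⟨sh, hsh⟩ : ∃ sh, PySem.List.index? m 1 = some sh :=
        Option.isSome_iff_exists.mp ((PySem.List.index?_isSome_iff (xs := m) (v := 1)).mpr h1)
      obtain ⟨hlt, hget, hbefore⟩ := PySem.List.getElem_of_index?_eq_some hsh
      -- decompose m at the first 1
      have hm : m = m.take sh ++ 1 :: m.drop (sh + 1) := by
        conv_lhs => rw [← List.take_append_drop sh m]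
        congr 1
        rw [List.drop_eq_getElem_cons hlt, hget]
      have hlen_take : (m.take sh).length = sh := by
        simp [List.length_take, Nat.min_eq_left (Nat.le_of_lt hlt)]
      have htake_no1 : ∀ x ∈ m.take sh, x ≠ 1 := by
        intro x hx
        obtain ⟨j, hj, hxe⟩ := List.mem_take_iff_getElem.mp hx
        have := hbefore j (by omega)
        rw [← hxe] at this ⊢
        exact this
      set d' : List Int := m.drop (sh + 1) with hd'
      set n : Int := (m.length : Int) with hn
      have hones_m : onesOf m = (sh : Int) :: onesFrom ((sh : Int) + 1) d' := by
        rw [onesOf_eq_onesFrom]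
        conv_lhs => rw [hm]
        rw [onesFrom_append, onesFrom_of_no_one _ htake_no1, onesFrom]
        simp [hlen_take]
      have hrot : PySem.List.slice m (some (sh : Int)) none ++ PySem.List.slice m none (some (sh : Int))
          = (1 :: d') ++ m.take sh := by
        rw [PySem.List.slice_from_natCast, PySem.List.slice_to_natCast]
        congr 1
        conv_lhs => rw [hm]
        rw [List.drop_append_of_le_length (by omega)]
        simp
      have hones_rot :
          (PySem.List.enumerate ((1 :: d') ++ m.take sh) 0).filterMap
            (fun ix => if ix.2 == 1 then some ix.1 else none) = 0 :: onesFrom 1 d' := by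
        simp only [beq_iff_eq]
        rw [filterMap_enumerate_eq_onesFrom, onesFrom_append]
        rw [onesFrom_of_no_one _ htake_no1]
        simp [onesFrom]
      have hlen_rot : ((((1 :: d') ++ m.take sh).length : Nat) : Int) = n := by
        have h2 : m.length = ((1 :: d') ++ m.take sh).length := by
          conv_lhs => rw [hm]
          simp [List.length_append]
          omega
        rw [hn, h2]
      -- compute A's result
      simp only [shape_of, hAguard, Bool.false_eq_true, if_false, hsh, hrot, hlen_rot]
      rw [foldA_eq_segsA n (sh : Int) _ [] (-1), segsA_eq_walkA, hones_rot]
      have hstep : walkA n (sh : Int) (-1) (0 :: onesFrom 1 d') = walkA n (sh : Int) 0 (onesFrom 1 d') := by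
        simp [walkA]
      rw [hstep]
      have hmap : onesFrom 1 d' = (onesFrom ((sh : Int) + 1) d').map (· - (sh : Int)) := by
        rw [onesFrom_shift d' 1, onesFrom_shift d' ((sh : Int) + 1), List.map_map]
        exact List.map_congr_left (fun a _ => by simp only [Function.comp_apply]; ring)
      have hww : walkA n (sh : Int) 0 (onesFrom 1 d')
          = walkB n ((sh : Int) + n) (sh : Int) (onesFrom ((sh : Int) + 1) d') := by
        rw [hmap]
        have := walkA_eq_walkB n (sh : Int) (onesFrom ((sh : Int) + 1) d') (sh : Int)
        simpa using this
      rw [hww]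
      -- compute B's result
      simp only [shape_of_alt, hAguard, Bool.false_eq_true, if_false, hones_m]
      rw [foldB_eq_walkB n ((sh : Int) + n) (onesFrom ((sh : Int) + 1) d') (sh : Int) []]
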